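-- pv_equiv track=rewrite | github.com/bridgecrewio/checkov | checkov/common/util/secrets_omitter.py | get_secret_lines
-- ===== SOURCE A (Python) =====
-- def get_secret_lines(code_block: list[tuple[int, str]] | None) -> tuple[list[int], list[str]]:
--     """
--     Given a code block object, returns the lines containing asterisks including the line range
--     :param code_block: list of tuples containing line number and the line itself
--     :return: list of size 2, representing the range of lines containing secrets from code_block,
--      and a list containing the lines from the range.
--     """
--     secret_lines_range = [-1, -1]
--     secrets_lines: list[str] = []
--     if not code_block:
--         return secret_lines_range, secrets_lines
--
--     for idx, line in code_block:
--         if '*' in line: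
--             secrets_lines.append(line)
--             if secret_lines_range[0] == -1:
--                 secret_lines_range[0] = idx
--             else:
--                 secret_lines_range[1] = idx
--     if secret_lines_range[1] == -1:
--         secret_lines_range[1] = secret_lines_range[0]
--
--     return secret_lines_range, secrets_lines
-- ===== SOURCE B (Python) =====
-- def get_secret_lines(code_block):
--     first = last = -1
--     lines = []
--     for idx, line in reversed(code_block or []):
--         if '*' in line:
--             if not lines:
--                 last = idx
--             lines.append(line)
--             first = idx
--     lines.reverse()
--     return [first, last], lines
-- ===== Notes on version B (the rewrite author's own statement) =====
-- stated objective: alternative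
-- what changed: Replaces A's forward fold with a -1-sentinel two-slot range state machine (plus post-loop fix-up) by a single REVERSE pass that builds the secrets list back-to-front: the first match seen in reverse pins the last index (guarded by list emptiness, no sentinel), the final match pins the first index.
-- intended difference: On inputs with at least two '*'-containing lines where the first or last matching line has index -1 (but not every matching index is -1), A's -1 sentinel collides with the real index and it returns a wrong range (e.g. [5,5] for match indices -1,5), while B returns the true first/last match indices ([-1,5]), which is the intended range. — e.g. on get_secret_lines(some [(-1, "*"), (5, "*")]): A returns ([5, 5], ["*", "*"]), B returns ([-1, 5], ["*", "*"])
import Mathlib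
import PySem

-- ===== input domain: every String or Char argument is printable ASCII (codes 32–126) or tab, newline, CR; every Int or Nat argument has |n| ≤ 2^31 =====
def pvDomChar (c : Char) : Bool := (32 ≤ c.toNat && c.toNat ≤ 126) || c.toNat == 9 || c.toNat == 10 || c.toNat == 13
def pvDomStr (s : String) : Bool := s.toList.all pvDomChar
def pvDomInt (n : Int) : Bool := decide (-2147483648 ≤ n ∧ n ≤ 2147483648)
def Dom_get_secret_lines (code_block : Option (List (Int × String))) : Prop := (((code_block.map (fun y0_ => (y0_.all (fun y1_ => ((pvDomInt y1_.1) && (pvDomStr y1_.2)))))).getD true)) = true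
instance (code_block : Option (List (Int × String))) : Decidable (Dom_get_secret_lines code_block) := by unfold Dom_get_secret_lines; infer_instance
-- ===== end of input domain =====

-- B replaces A's forward -1-sentinel two-slot range state machine by a single reverse pass that
-- builds the secrets back-to-front and pins last/first match indices without a sentinel
-- (alternative decomposition; fixes A's sentinel collision with a literal index -1, stated as D_).


-- ===== PORT A =====
-- shared test: '*' in line
def pvHasStar (p : Int × String) : Bool := PySem.Str.isIn "*" p.2

-- the body of A's if '*' in line branch: the two-slot range update (range[0] sentinel check)
def pvStepR (r : Int × Int) (p : Int × String) : Int × Int :=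
  if r.1 = -1 then (p.1, r.2) else (r.1, p.1)

-- one iteration of A's for-loop over ((range0, range1), secrets_lines)
def pvStepA (acc : (Int × Int) × List String) (p : Int × String) : (Int × Int) × List String :=
  if pvHasStar p then (pvStepR acc.1 p, acc.2 ++ [p.2]) else acc

def get_secret_lines (code_block : Option (List (Int × String))) : List Int × List String :=
  match code_block with
  | none => ([-1, -1], [])
  | some l =>
    if l.isEmpty then ([-1, -1], [])      -- "if not code_block" is also true for []
    else
      let st := l.foldl pvStepA ((-1, -1), [])
      let r1 := if st.1.2 = -1 then st.1.1 else st.1.2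
      ([st.1.1, r1], st.2)

-- ===== PORT B =====
-- one iteration of B's loop over reversed(code_block or []); state ((first, last), lines):
-- 'if not lines: last = idx' then 'lines.append(line)' then 'first = idx'
def pvStepB (acc : (Int × Int) × List String) (p : Int × String) : (Int × Int) × List String :=
  if pvHasStar p then
    ((p.1, if acc.2.isEmpty then p.1 else acc.1.2), acc.2 ++ [p.2])
  else acc

def get_secret_lines_alt (code_block : Option (List (Int × String))) : List Int × List String :=
  let st := (code_block.getD []).reverse.foldl pvStepB ((-1, -1), [])
  ([st.1.1, st.1.2], st.2.reverse)     -- lines.reverse() at the end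

-- ===== PRECONDITION & SPEC =====
-- On inputs with at least two '*'-containing lines where the first or last matching line has
-- index -1 (but not every matching index is -1), A's -1 sentinel collides with the real index
-- and it returns a wrong range, while B returns the true first/last match indices, which is
-- the intended range. (D_ only inspects the input: which lines contain '*'.)
def pvStarIdx (cb : Option (List (Int × String))) : List Int :=
  ((cb.getD []).filter pvHasStar).map Prod.fst

def D_get_secret_lines (code_block : Option (List (Int × String))) : Prop :=
  2 ≤ (pvStarIdx code_block).length ∧
    ((pvStarIdx code_block).headD 0 = -1 ∨ (pvStarIdx code_block).getLastD 0 = -1) ∧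
    ∃ x ∈ pvStarIdx code_block, x ≠ -1
instance (code_block : Option (List (Int × String))) : Decidable (D_get_secret_lines code_block) := by
  unfold D_get_secret_lines; infer_instance

def Spec_get_secret_lines (code_block : Option (List (Int × String))) (out : List Int × List String) : Prop :=
  ¬ D_get_secret_lines code_block → out = get_secret_lines_alt code_block
instance (code_block : Option (List (Int × String))) (out : List Int × List String) : Decidable (Spec_get_secret_lines code_block out) := by
  unfold Spec_get_secret_lines; infer_instance

def pvDiffWitness_get_secret_lines : (Option (List (Int × String))) := some [(-1, "*"), (5, "*")]
def pvDiffWitnessOut_get_secret_lines : (List Int × List String) × (List Int × List String) :=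
  (([5, 5], ["*", "*"]), ([-1, 5], ["*", "*"]))

-- ===== CLAIM (what is proved, stated in full; the proofs are below) =====
def Claim_unchanged_get_secret_lines : Prop := ∀ (code_block : Option (List (Int × String))), Dom_get_secret_lines code_block → Spec_get_secret_lines code_block (get_secret_lines code_block)
def Claim_changed_get_secret_lines : Prop := Dom_get_secret_lines (pvDiffWitness_get_secret_lines) ∧ D_get_secret_lines (pvDiffWitness_get_secret_lines) ∧ get_secret_lines (pvDiffWitness_get_secret_lines) = pvDiffWitnessOut_get_secret_lines.1 ∧ get_secret_lines_alt (pvDiffWitness_get_secret_lines) = pvDiffWitnessOut_get_secret_lines.2 ∧ pvDiffWitnessOut_get_secret_lines.1 ≠ pvDiffWitnessOut_get_secret_lines.2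
def Claim_exact_get_secret_lines : Prop := ∀ (code_block : Option (List (Int × String))), Dom_get_secret_lines code_block → D_get_secret_lines code_block → get_secret_lines code_block ≠ get_secret_lines_alt code_block

-- ===== LEMMAS AND PROOFS =====

-- proof-side characterisation of B's result: first/last index of the '*'-filtered list
def pvBspec (cb : Option (List (Int × String))) : List Int × List String :=
  let m := (cb.getD []).filter pvHasStar
  if m.isEmpty then ([-1, -1], m.map Prod.snd)
  else ([(m.headD (-1, "")).1, (m.getLastD (-1, "")).1], m.map Prod.snd)

-- unconditional version of B's step (used only on filtered lists)
def pvStepB' (acc : (Int × Int) × List String) (p : Int × String) : (Int × Int) × List String :=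
  ((p.1, if acc.2.isEmpty then p.1 else acc.1.2), acc.2 ++ [p.2])

-- B's loop ignores non-matching elements
theorem pv_foldB_filter (l : List (Int × String)) (acc : (Int × Int) × List String) :
    l.foldl pvStepB acc = (l.filter pvHasStar).foldl pvStepB' acc := by
  induction l generalizing acc with
  | nil => rfl
  | cons a t ih =>
    by_cases h : pvHasStar a = true <;> simp [pvStepB, pvStepB', h, ih]

theorem pv_getLastD_fst (ys : List (Int × String)) (a : Int × String) :
    (ys.getLastD (a.1, "")).1 = (ys.getLastD a).1 := by
  rw [List.getLastD_eq_getLast?, List.getLastD_eq_getLast?]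
  cases ys.getLast? <;> rfl

-- once lines is nonempty, last never changes and first tracks each index
theorem pv_foldB_nonempty (xs : List (Int × String)) (f l : Int) (s : List String)
    (h : ¬ s.isEmpty = true) :
    xs.foldl pvStepB' ((f, l), s) = (((xs.getLastD (f, "")).1, l), s ++ (xs.map Prod.snd)) := by
  induction xs generalizing f s with
  | nil => simp
  | cons a t ih =>
    rw [List.foldl_cons, show pvStepB' ((f, l), s) a = ((a.1, l), s ++ [a.2]) by
        simp [pvStepB', h], ih a.1 (s ++ [a.2]) (by simp), List.getLastD_cons,
      pv_getLastD_fst]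
    simp

-- B's fold on a nonempty (filtered) list
theorem pv_foldB_ne (a : Int × String) (ys : List (Int × String)) :
    (a :: ys).foldl pvStepB' ((-1, -1), []) =
      (((ys.getLastD (a.1, "")).1, a.1), a.2 :: ys.map Prod.snd) := by
  rw [List.foldl_cons, show pvStepB' ((-1, -1), []) a = ((a.1, a.1), [a.2]) by simp [pvStepB'],
    pv_foldB_nonempty ys a.1 a.1 [a.2] (by simp)]
  rfl

-- B computes pvBspec
theorem pv_alt_char (cb : Option (List (Int × String))) :
    get_secret_lines_alt cb = pvBspec cb := by
  unfold get_secret_lines_alt pvBspec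
  rw [pv_foldB_filter, List.filter_reverse]
  cases hm : (cb.getD []).filter pvHasStar with
  | nil => simp
  | cons p t =>
    cases hr : (p :: t).reverse with
    | nil => exact absurd (List.reverse_eq_nil_iff.mp hr) (by simp)
    | cons a ys =>
      rw [pv_foldB_ne]
      simp only [List.isEmpty_cons, Bool.false_eq_true, if_false]
      have h1 : (ys.getLastD (a.1, "")).1 = ((p :: t).headD (-1, "")).1 := by
        rw [pv_getLastD_fst, show ys.getLastD a = (a :: ys).getLastD a from (List.getLastD_cons ..).symm,
          ← hr, List.getLastD_eq_getLast?, List.getLast?_reverse]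
        simp
      have h2 : a = (p :: t).getLastD (-1, "") := by
        have h0 : (a :: ys).head? = some a := rfl
        rw [← hr, List.head?_reverse] at h0
        rw [List.getLastD_eq_getLast?, h0]
        rfl
      have h3 : (a.2 :: ys.map Prod.snd).reverse = (p :: t).map Prod.snd := by
        rw [show a.2 :: ys.map Prod.snd = (a :: ys).map Prod.snd from rfl, ← hr,
          ← List.map_reverse, List.reverse_reverse]
      rw [h1, ← h2, h3]

-- A's loop only changes state on matching elements: it is the range fold over the filtered list.
theorem pv_foldA_eq (l : List (Int × String)) (r : Int × Int) (s : List String) :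
    l.foldl pvStepA (r, s) =
      ((l.filter pvHasStar).foldl pvStepR r, s ++ (l.filter pvHasStar).map Prod.snd) := by
  induction l generalizing r s with
  | nil => simp
  | cons a t ih =>
    by_cases h : pvHasStar a = true <;> simp [pvStepA, h, ih]

-- once range0 is set to a non-(-1) value it never changes; range1 tracks the last index seen
theorem pv_locked (m : List (Int × String)) (r0 r1 : Int) (h : r0 ≠ -1) :
    m.foldl pvStepR (r0, r1) = (r0, m.foldl (fun (_ : Int) p => p.1) r1) := by
  induction m generalizing r1 with
  | nil => rfl
  | cons a t ih => simp [pvStepR, h, ih]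

-- if every matching index is -1, the state never leaves the sentinel
theorem pv_stuck (m : List (Int × String)) (r1 : Int) (h : ∀ p ∈ m, p.1 = -1) :
    m.foldl pvStepR (-1, r1) = (-1, r1) := by
  induction m with
  | nil => rfl
  | cons a t ih =>
    rw [List.foldl_cons, show pvStepR (-1, r1) a = (-1, r1) by simp [pvStepR, h a (by simp)]]
    exact ih (fun p hp => h p (by simp [hp]))

-- the const-replacing fold computes the last index (or the start value on [])
theorem pv_foldl_last (m : List (Int × String)) (r : Int) :
    m.foldl (fun (_ : Int) p => p.1) r = (m.getLastD (r, "")).1 := by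
  induction m generalizing r with
  | nil => rfl
  | cons a t ih =>
    rw [List.foldl_cons, ih, List.getLastD_cons]
    cases t with
    | nil => rfl
    | cons b u => rw [List.getLastD_cons, List.getLastD_cons]

-- if some matching index is not -1, range0 ends up non-(-1)
theorem pv_fst_ne (m : List (Int × String)) (r1 : Int) (h : ∃ q ∈ m, q.1 ≠ -1) :
    (m.foldl pvStepR (-1, r1)).1 ≠ -1 := by
  induction m generalizing r1 with
  | nil => simp at h
  | cons a t ih =>
    by_cases ha : a.1 = -1
    · rw [List.foldl_cons, show pvStepR (-1, r1) a = (-1, r1) by simp [pvStepR, ha]]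
      refine ih r1 ?_
      rcases h with ⟨q, hq, hq1⟩
      rcases List.mem_cons.mp hq with hq | hq
      · exact absurd (by rw [hq]; exact ha) hq1
      · exact ⟨q, hq, hq1⟩
    · rw [List.foldl_cons, show pvStepR (-1, r1) a = (a.1, r1) by simp [pvStepR],
        pv_locked t a.1 r1 ha]
      exact ha

-- index-list ↔ pair-list bridges for D_'s condition
theorem pv_map_getLastD (m : List (Int × String)) (q : Int × String) :
    (m.map Prod.fst).getLastD q.1 = (m.getLastD q).1 := by
  induction m generalizing q with
  | nil => rfl
  | cons b u ih => simp only [List.map_cons, List.getLastD_cons]; exact ih b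

theorem pv_idx_last (p b : Int × String) (u : List (Int × String)) :
    (p.1 :: (b :: u).map Prod.fst).getLastD 0 = (u.getLastD b).1 := by
  rw [List.getLastD_cons, pv_map_getLastD, List.getLastD_cons]

theorem pv_idx_all {p : Int × String} {t : List (Int × String)}
    (h : ∀ x ∈ p.1 :: t.map Prod.fst, x = -1) : ∀ q ∈ p :: t, q.1 = -1 := by
  intro q hq
  exact h q.1 (by rw [← List.map_cons]; exact List.mem_map_of_mem hq)

theorem pv_idx_ex {p : Int × String} {t : List (Int × String)}
    (h : ∃ x ∈ p.1 :: t.map Prod.fst, x ≠ -1) : ∃ q ∈ p :: t, q.1 ≠ -1 := by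
  rcases h with ⟨x, hx, hne⟩
  rw [← List.map_cons] at hx
  rcases List.mem_map.mp hx with ⟨q, hq, rfl⟩
  exact ⟨q, hq, hne⟩

-- ===== VERDICT (by name: the statement is the Claim_ definition above) =====
theorem get_secret_lines_spec : Claim_unchanged_get_secret_lines := by
  intro cb _ hnd'
  rw [pv_alt_char]
  cases cb with
  | none => rfl
  | some l =>
    by_cases hl : l.isEmpty
    · simp [get_secret_lines, pvBspec, List.isEmpty_iff.mp hl]
    · simp only [D_get_secret_lines, pvStarIdx, Option.getD_some] at hnd'
      push Not at hnd'
      simp only [get_secret_lines, pvBspec, Option.getD_some, hl, Bool.false_eq_true, if_false,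
        pv_foldA_eq]
      cases hme : l.filter pvHasStar with
      | nil => simp
      | cons p t =>
        rw [hme] at hnd'
        simp only [List.map_cons, List.length_cons, List.length_map, List.headD_cons] at hnd'
        simp only [List.isEmpty_cons, Bool.false_eq_true, if_false, List.nil_append,
          List.headD_cons]
        by_cases hp : p.1 = -1
        · by_cases hall : ∀ q ∈ p :: t, q.1 = -1
          · have hlast : ((p :: t).getLastD ((-1 : Int), "")).1 = -1 := by
              rw [List.getLastD_cons]
              exact hall _ List.getLastD_mem_cons
            rw [pv_stuck _ _ hall, hlast, hp]
            simp
          · exfalso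
            cases t with
            | nil =>
              apply hall
              intro q hq
              rw [List.mem_singleton.mp hq]
              exact hp
            | cons b u =>
              exact hall (pv_idx_all (hnd' (by simp) (Or.inl hp)))
        · rw [List.foldl_cons, show pvStepR (-1, -1) p = (p.1, -1) by simp [pvStepR],
            pv_locked t p.1 (-1) hp, pv_foldl_last, List.getLastD_cons]
          cases ht : t with
          | nil => simp [List.getLastD]
          | cons b u =>
            rw [List.getLastD_cons, List.getLastD_cons]
            by_cases hL : ((u.getLastD b)).1 = -1
            · rw [ht] at hnd'
              have hall := pv_idx_all (hnd' (by simp) (Or.inr (by rw [pv_idx_last]; exact hL)))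
              exact absurd (hall p (by simp)) hp
            · rw [if_neg hL]

theorem get_secret_lines_changed : Claim_changed_get_secret_lines := by
  unfold Claim_changed_get_secret_lines; decide

theorem get_secret_lines_tight : Claim_exact_get_secret_lines := by
  intro cb _ hd
  rw [pv_alt_char]
  cases cb with
  | none => simp [D_get_secret_lines, pvStarIdx] at hd
  | some l =>
    simp only [D_get_secret_lines, pvStarIdx, Option.getD_some] at hd
    obtain ⟨hlen, hio, hnall⟩ := hd
    have hl : ¬ l.isEmpty = true := by
      intro h
      rw [List.isEmpty_iff.mp h] at hlen
      simp at hlen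
    simp only [get_secret_lines, pvBspec, Option.getD_some, hl, Bool.false_eq_true, if_false,
      pv_foldA_eq]
    cases hme : l.filter pvHasStar with
    | nil => rw [hme] at hlen; simp at hlen
    | cons p t =>
      rw [hme] at hlen hio hnall
      simp only [List.map_cons, List.length_cons, List.length_map, List.headD_cons]
        at hlen hio hnall
      simp only [List.isEmpty_cons, Bool.false_eq_true, if_false, List.nil_append,
        List.headD_cons]
      by_cases hp : p.1 = -1
      · have hfst := pv_fst_ne (p :: t) (-1) (pv_idx_ex hnall)
        intro heq
        simp only [Prod.mk.injEq, List.cons.injEq] at heq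
        exact hfst (by rw [heq.1.1, hp])
      · cases t with
        | nil => simp at hlen
        | cons b u =>
          have hL : (u.getLastD b).1 = -1 := by
            rcases hio with h | h
            · exact absurd h hp
            · rw [pv_idx_last] at h; exact h
          rw [List.foldl_cons, show pvStepR (-1, -1) p = (p.1, -1) by simp [pvStepR],
            pv_locked _ p.1 (-1) hp, pv_foldl_last]
          simp only [List.getLastD_cons]
          rw [List.getLastD_eq_getLast?] at hL
          simp [hL, hp]
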